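-- pv_equiv track=rewrite | github.com/h843215/Python-Code | Exercise 10/maxima.py | find_maxima
-- ===== SOURCE A (Python) =====
-- def find_maxima(lst):
--     if lst == []:
--         return lst
--     lst1 = [lst[0]]
--     c_max = lst[0]
--     for x in lst:
--         if x > c_max:
--             c_max = x
--             lst1.append(x)
--     return lst1
-- ===== SOURCE B (Python) =====
-- def find_maxima(lst):
--     # build the prefix-maximum table, then collapse consecutive runs
--     running = []
--     for x in lst:
--         running.append(x if not running else max(running[-1], x))
--     out = []
--     for v in running:
--         if not out or out[-1] != v:
--             out.append(v)
--     return out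
-- ===== Notes on version B (the rewrite author's own statement) =====
-- stated objective: idiomatic
-- what changed: Replaces A's single track-and-append scan with a two-phase decomposition: build the prefix-maximum table, then collapse consecutive equal runs.
import Mathlib
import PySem

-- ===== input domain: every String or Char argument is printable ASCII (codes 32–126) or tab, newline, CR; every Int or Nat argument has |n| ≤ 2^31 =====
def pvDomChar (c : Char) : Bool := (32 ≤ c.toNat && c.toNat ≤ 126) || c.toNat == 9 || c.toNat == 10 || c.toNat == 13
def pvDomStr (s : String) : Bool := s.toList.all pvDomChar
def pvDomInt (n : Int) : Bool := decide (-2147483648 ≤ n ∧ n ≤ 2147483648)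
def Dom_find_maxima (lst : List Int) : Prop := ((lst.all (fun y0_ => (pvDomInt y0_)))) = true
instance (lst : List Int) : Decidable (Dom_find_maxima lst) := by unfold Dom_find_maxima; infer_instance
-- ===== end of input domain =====

-- B builds the prefix-maximum table then collapses consecutive equal runs (idiomatic two-phase decomposition).


-- ===== PORT A =====
-- the for-loop of A: state (lst1, c_max)
def pvLoopA : List Int → Int → List Int → List Int
  | acc, _, [] => acc
  | acc, m, x :: xs => if x > m then pvLoopA (acc ++ [x]) x xs else pvLoopA acc m xs

def find_maxima (lst : List Int) : List Int :=
  match lst with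
  | [] => []
  | h :: _ => pvLoopA [h] h lst   -- A iterates over the whole lst

-- ===== PORT B =====
-- phase 1: running prefix maxima (running.append(x if not running else max(running[-1], x)))
def pvBuildRun : List Int → List Int → List Int
  | run, [] => run
  | run, x :: xs =>
      pvBuildRun (run ++ [match run.getLast? with | none => x | some m => max m x]) xs

-- phase 2: collapse consecutive equal runs (if not out or out[-1] != v)
def pvCollapse : List Int → List Int → List Int
  | out, [] => out
  | out, v :: vs => pvCollapse (if out.getLast? = some v then out else out ++ [v]) vs

def find_maxima_alt (lst : List Int) : List Int :=
  pvCollapse [] (pvBuildRun [] lst)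

-- ===== PRECONDITION & SPEC =====
def Spec_find_maxima (lst : List Int) (out : List Int) : Prop := out = find_maxima_alt lst
instance (lst : List Int) (out : List Int) : Decidable (Spec_find_maxima lst out) := by unfold Spec_find_maxima; infer_instance

-- ===== CLAIM (what is proved, stated in full; the proofs are below) =====
def Claim_equal_find_maxima : Prop := ∀ (lst : List Int), Dom_find_maxima lst → Spec_find_maxima lst (find_maxima lst)

-- ===== LEMMAS AND PROOFS =====

-- the suffix pvBuildRun appends beyond its accumulator, given the accumulator's last element
def pvSuffix : Int → List Int → List Int
  | _, [] => []
  | m, x :: xs => max m x :: pvSuffix (max m x) xs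

theorem pvBuildRun_eq (t : List Int) : ∀ (run : List Int) (m : Int),
    run.getLast? = some m → pvBuildRun run t = run ++ pvSuffix m t := by
  induction t with
  | nil => intro run m _; simp [pvBuildRun, pvSuffix]
  | cons x xs ih =>
      intro run m hm
      simp only [pvBuildRun, hm, pvSuffix]
      rw [ih (run ++ [max m x]) (max m x) (by simp)]
      simp

theorem pvCollapse_suffix (t : List Int) : ∀ (acc : List Int) (m : Int),
    acc.getLast? = some m → pvCollapse acc (pvSuffix m t) = pvLoopA acc m t := by
  induction t with
  | nil => intro acc m _; simp [pvCollapse, pvSuffix, pvLoopA]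
  | cons x xs ih =>
      intro acc m hm
      simp only [pvSuffix, pvCollapse, pvLoopA]
      by_cases hx : x > m
      · have hmx : max m x = x := by omega
        rw [hmx]
        have hne : ¬ acc.getLast? = some x := by
          rw [hm]; intro h; injection h with h; omega
        rw [if_neg hne, if_pos hx]
        exact ih (acc ++ [x]) x (by simp)
      · have hmx : max m x = m := by omega
        rw [hmx, if_pos hm, if_neg hx]
        exact ih acc m hm

-- ===== VERDICT (by name: the statement is the Claim_ definition above) =====
theorem find_maxima_spec : Claim_equal_find_maxima := by
  intro lst _
  unfold Spec_find_maxima find_maxima find_maxima_alt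
  match lst with
  | [] => simp [pvBuildRun, pvCollapse]
  | h :: t =>
      simp only [pvBuildRun, List.getLast?, List.nil_append]
      rw [pvBuildRun_eq t [h] h (by simp)]
      have : pvCollapse [] ([h] ++ pvSuffix h t) = pvCollapse [h] (pvSuffix h t) := by
        simp [pvCollapse]
      rw [this, pvCollapse_suffix t [h] h (by simp)]
      simp [pvLoopA]
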